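-- pv_equiv track=rewrite | github.com/c-rainbow/shiftscheduler | shiftscheduler/i18n/po_validator.py | GetDuplicateMsgIds
-- ===== SOURCE A (Python) =====
-- def GetDuplicateMsgIds(msgids):
--     visited = set()
--     duplicates = set()
--     for msgid in msgids:
--         if msgid in visited:
--             duplicates.add(msgid)
--         else:
--             visited.add(msgid)
--
--     return duplicates
-- ===== SOURCE B (Python) =====
-- def GetDuplicateMsgIds(msgids):
--     seq = list(msgids)
--     return {m for i, m in enumerate(seq) if seq[:i].count(m) == 1}
-- ===== Notes on version B (the rewrite author's own statement) =====
-- stated objective: simpler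
-- what changed: B replaces A's stateful two-set loop by a stateless set comprehension that keeps each element exactly at its second occurrence, detected by counting it in the prefix before the current index.
import Mathlib
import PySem

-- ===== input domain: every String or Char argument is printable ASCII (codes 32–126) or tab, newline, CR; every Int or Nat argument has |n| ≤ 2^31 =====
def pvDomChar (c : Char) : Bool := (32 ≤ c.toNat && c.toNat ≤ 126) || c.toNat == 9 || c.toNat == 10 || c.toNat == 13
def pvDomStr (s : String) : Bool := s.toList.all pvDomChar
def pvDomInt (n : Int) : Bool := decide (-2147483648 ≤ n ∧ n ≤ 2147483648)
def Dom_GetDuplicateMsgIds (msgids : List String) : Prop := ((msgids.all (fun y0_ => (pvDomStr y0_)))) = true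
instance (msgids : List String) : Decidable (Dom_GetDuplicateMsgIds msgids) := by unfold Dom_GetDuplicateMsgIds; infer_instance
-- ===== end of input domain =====

-- B replaces A's stateful two-set loop by a stateless prefix-count comprehension
-- (simpler: a one-line filter; quadratic instead of linear, no speed claimed).


-- ===== PORT A =====
-- visited/duplicates sets, branch on membership
def GetDuplicateMsgIds (msgids : List String) : List String :=
  (msgids.foldl
    (fun (p : PySem.Set String × PySem.Set String) msgid =>
      if PySem.Set.contains p.1 msgid then (p.1, PySem.Set.add p.2 msgid)
      else (PySem.Set.add p.1 msgid, p.2))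
    (PySem.Set.empty, PySem.Set.empty)).2

-- ===== PORT B =====
-- seq = list(msgids); {m for i, m in enumerate(seq) if seq[:i].count(m) == 1}
def GetDuplicateMsgIds_alt (msgids : List String) : List String :=
  PySem.Set.ofList
    (((PySem.List.enumerate msgids 0).filter
        (fun p => PySem.List.count (PySem.List.slice msgids none (some p.1)) p.2 == 1)).map
      (fun p => p.2))

-- ===== PRECONDITION & SPEC =====
def Spec_GetDuplicateMsgIds (msgids : List String) (out : List String) : Prop := out = GetDuplicateMsgIds_alt msgids
instance (msgids : List String) (out : List String) : Decidable (Spec_GetDuplicateMsgIds msgids out) := by unfold Spec_GetDuplicateMsgIds; infer_instance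

-- ===== CLAIM =====
def Claim_equal_GetDuplicateMsgIds : Prop := ∀ (msgids : List String), Dom_GetDuplicateMsgIds msgids → Spec_GetDuplicateMsgIds msgids (GetDuplicateMsgIds msgids)

-- ===== LEMMAS AND PROOFS =====

-- Reference list: the elements of `rest` that occur for the second time, counted
-- relative to the already-seen prefix `pre`, in order of second occurrence.
def pvAux (pre rest : List String) : List String :=
  match rest with
  | [] => []
  | m :: rest => (if pre.count m = 1 then [m] else []) ++ pvAux (pre ++ [m]) rest

theorem pv_mem_aux (rest : List String) : ∀ (pre : List String) (m : String),
    m ∈ pvAux pre rest → pre.count m ≤ 1 := by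
  induction rest with
  | nil => intro pre m h; simp [pvAux] at h
  | cons x rest ih =>
    intro pre m h
    simp only [pvAux, List.mem_append] at h
    rcases h with h | h
    · split_ifs at h with hc
      · simp only [List.mem_singleton] at h; subst h; omega
      · simp at h
    · have := ih (pre ++ [x]) m h
      simp [List.count_append] at this
      omega

theorem pv_nodup_aux (rest : List String) : ∀ (pre : List String), (pvAux pre rest).Nodup := by
  induction rest with
  | nil => intro pre; simp [pvAux]
  | cons x rest ih =>
    intro pre
    simp only [pvAux]
    split_ifs with hc
    · refine List.Nodup.cons (fun h => ?_) (ih (pre ++ [x]))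
      have := pv_mem_aux rest (pre ++ [x]) x h
      simp [List.count_append] at this
      omega
    · simpa using ih (pre ++ [x])

-- A's loop produces `dup ++ pvAux pre rest` under the visited/duplicates invariants.
theorem pv_A_loop (rest : List String) : ∀ (v dup pre : List String),
    (∀ m, m ∈ v ↔ m ∈ pre) →
    (∀ m, m ∈ dup ↔ 2 ≤ pre.count m) →
    (rest.foldl
      (fun (p : PySem.Set String × PySem.Set String) msgid =>
        if PySem.Set.contains p.1 msgid then (p.1, PySem.Set.add p.2 msgid)
        else (PySem.Set.add p.1 msgid, p.2))
      (v, dup)).2 = dup ++ pvAux pre rest := by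
  induction rest with
  | nil => intro v dup pre _ _; simp [pvAux]
  | cons m rest ih =>
    intro v dup pre hv hd
    simp only [List.foldl_cons, pvAux]
    have hcnt : ∀ m', (pre ++ [m]).count m' = pre.count m' + if m' = m then 1 else 0 := by
      intro m'
      by_cases h : m' = m
      · subst h; simp [List.count_append]
      · simp [List.count_append, h, Ne.symm h]
    by_cases hmp : m ∈ pre
    · rw [if_pos ((PySem.Set.contains_iff v m).mpr ((hv m).mpr hmp))]
      have hv' : ∀ m', m' ∈ v ↔ m' ∈ pre ++ [m] := by
        intro m'; rw [hv m']; simp only [List.mem_append, List.mem_singleton]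
        constructor
        · exact Or.inl
        · rintro (h | rfl); exacts [h, hmp]
      have h1 : 0 < pre.count m := by simpa using List.count_pos_iff.mpr hmp
      by_cases h2 : 2 ≤ pre.count m
      · -- already a known duplicate: set-add is a no-op, nothing emitted
        rw [PySem.Set.add_of_mem ((hd m).mpr h2), if_neg (by omega), List.nil_append]
        refine ih v dup (pre ++ [m]) hv' (fun m' => ?_)
        rw [hd m', hcnt m']
        by_cases hmm : m' = m
        · subst hmm; omega
        · simp [hmm]
      · -- exactly the second occurrence: both emit m
        have hc1 : pre.count m = 1 := by omega
        have hmd : m ∉ dup := fun h => h2 ((hd m).mp h)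
        have hd' : ∀ m', m' ∈ dup ++ [m] ↔ 2 ≤ (pre ++ [m]).count m' := by
          intro m'
          rw [List.mem_append, List.mem_singleton, hd m', hcnt m']
          by_cases hmm : m' = m
          · subst hmm; simp [hc1]
          · simp [hmm]
        rw [PySem.Set.add_of_not_mem hmd, if_pos hc1,
          ih v (dup ++ [m]) (pre ++ [m]) hv' hd', List.append_assoc, List.singleton_append]
    · -- first occurrence: visited grows, nothing emitted
      have h0 : pre.count m = 0 := by
        by_contra h
        exact hmp (List.count_pos_iff.mp (by omega))
      rw [if_neg (fun h => hmp ((hv m).mp ((PySem.Set.contains_iff v m).mp h))),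
        if_neg (by omega), List.nil_append]
      refine ih (PySem.Set.add v m) dup (pre ++ [m]) (fun m' => ?_) (fun m' => ?_)
      · rw [PySem.Set.mem_add, hv m']
        simp [List.mem_append]
      · rw [hd m', hcnt m']
        by_cases hmm : m' = m
        · subst hmm; simp [h0]
        · simp [hmm]

-- B's comprehension body equals pvAux, indices replaced by the concrete prefix.
theorem pv_B_loop (full : List String) (rest : List String) : ∀ (pre : List String),
    pre ++ rest = full →
    (((PySem.List.enumerate rest (pre.length : Int)).filter
        (fun p => PySem.List.count (PySem.List.slice full none (some p.1)) p.2 == 1)).map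
      (fun p => p.2)) = pvAux pre rest := by
  induction rest with
  | nil => intro pre _; simp [PySem.List.enumerate_nil, pvAux]
  | cons m rest ih =>
    intro pre hfull
    have hstep : (pre.length : Int) + 1 = (((pre ++ [m]).length : Nat) : Int) := by simp
    have hrec := ih (pre ++ [m]) (by simpa using hfull)
    have hslice : PySem.List.slice full none (some (pre.length : Int)) = pre := by
      rw [PySem.List.slice_to_natCast, ← hfull, List.take_left]
    rw [PySem.List.enumerate_cons, hstep, List.filter_cons]
    by_cases hc : pre.count m = 1
    · rw [if_pos (by simp [hslice, PySem.List.count_eq, hc]), List.map_cons, hrec]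
      simp [pvAux, hc]
    · rw [if_neg (by simp [hslice, PySem.List.count_eq, hc]), hrec]
      simp [pvAux, hc]

-- ===== VERDICT =====
theorem GetDuplicateMsgIds_spec : Claim_equal_GetDuplicateMsgIds := by
  intro msgids _
  show GetDuplicateMsgIds msgids = GetDuplicateMsgIds_alt msgids
  unfold GetDuplicateMsgIds GetDuplicateMsgIds_alt
  have hA := pv_A_loop msgids PySem.Set.empty PySem.Set.empty []
    (by simp [PySem.Set.empty]) (by simp [PySem.Set.empty])
  have hB := pv_B_loop msgids msgids [] (by simp)
  simp only [List.length_nil, Nat.cast_zero] at hB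
  rw [hA, hB]
  simp only [PySem.Set.empty, List.nil_append]
  exact (PySem.Set.ofList_eq_self_of_nodup _ (pv_nodup_aux msgids [])).symm
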